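-- pv_equiv track=rewrite | github.com/yashaskl2110/lotx-detector | tor_monitor.py | assess_process_risk
-- ===== SOURCE A (Python) =====
-- def assess_process_risk(process_name):
--     """
--     Assess how suspicious it is for THIS specific process
--     to be connecting to Tor.
--     Trusted apps connecting to Tor = LotX C2 pattern.
--     """
--     # These processes should NEVER connect to Tor
--     # If they do it's a strong LotX indicator
--     high_risk_processes = [
--         'chrome', 'firefox', 'safari', 'msedge',  # browsers
--         'python', 'python3', 'pythonw',             # scripts
--         'node', 'nodejs',                           # JS runtimes
--         'curl', 'wget',                             # download tools
--         'powershell', 'cmd',                        # shells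
--         'outlook', 'thunderbird',                   # email clients
--         'slack', 'teams', 'zoom',                   # comms apps
--         'dropbox', 'onedrive', 'googledrivefs',     # cloud storage
--     ]
--
--     process_lower = process_name.lower()
--     for risky in high_risk_processes:
--         if risky in process_lower:
--             return f"HIGH RISK — {process_name} is a trusted app connecting to Tor (LotX indicator)"
--
--     return f"UNKNOWN process {process_name} connecting to Tor"
-- ===== SOURCE B (Python) =====
-- def assess_process_risk(process_name):
--     """
--     Assess how suspicious it is for THIS specific process
--     to be connecting to Tor.
--     Trusted apps connecting to Tor = LotX C2 pattern.
--     """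
--     keywords = (
--         'chrome', 'firefox', 'safari', 'msedge',
--         'python', 'python3', 'pythonw',
--         'node', 'nodejs',
--         'curl', 'wget',
--         'powershell', 'cmd',
--         'outlook', 'thunderbird',
--         'slack', 'teams', 'zoom',
--         'dropbox', 'onedrive', 'googledrivefs',
--     )
--     low = process_name.lower()
--     # single left-to-right pass over the name: at each position test whether
--     # any risky keyword starts there (str.startswith accepts a tuple)
--     if any(low.startswith(keywords, i) for i in range(len(low) + 1)):
--         return f"HIGH RISK — {process_name} is a trusted app connecting to Tor (LotX indicator)"
--     return f"UNKNOWN process {process_name} connecting to Tor"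
-- ===== Notes on version B (the rewrite author's own statement) =====
-- stated objective: alternative
-- what changed: Replaced the per-keyword substring scan (one 'in' scan of the name for each of the 21 keywords, with an early return) by a single left-to-right pass over the name that at each position tests whether any keyword starts there via one tuple-argument str.startswith call; the HIGH RISK message is independent of which keyword matched, so the result is identical.
import Mathlib
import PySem

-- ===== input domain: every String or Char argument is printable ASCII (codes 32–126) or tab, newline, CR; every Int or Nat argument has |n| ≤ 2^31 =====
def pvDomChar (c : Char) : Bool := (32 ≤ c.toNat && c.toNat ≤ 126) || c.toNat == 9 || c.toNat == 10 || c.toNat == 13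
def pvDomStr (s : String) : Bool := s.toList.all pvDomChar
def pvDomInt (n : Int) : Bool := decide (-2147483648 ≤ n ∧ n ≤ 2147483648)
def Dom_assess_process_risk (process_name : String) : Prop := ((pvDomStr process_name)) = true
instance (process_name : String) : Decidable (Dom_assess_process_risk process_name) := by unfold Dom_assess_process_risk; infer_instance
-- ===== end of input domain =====

-- B replaces A's per-keyword 'in' scans by one left-to-right pass over the name testing all
-- keywords at each position (objective: alternative; same return value everywhere).

-- ===== PORT A =====
def high_risk_processes : List String :=
  ["chrome", "firefox", "safari", "msedge",
   "python", "python3", "pythonw",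
   "node", "nodejs",
   "curl", "wget",
   "powershell", "cmd",
   "outlook", "thunderbird",
   "slack", "teams", "zoom",
   "dropbox", "onedrive", "googledrivefs"]

-- the 'for risky in …: if risky in process_lower: return …' loop with early return
def assessLoopA (process_name : String) (process_lower : String) : List String → String
  | [] => "UNKNOWN process " ++ process_name ++ " connecting to Tor"
  | risky :: rest =>
      if PySem.Str.isIn risky process_lower then
        "HIGH RISK — " ++ process_name ++ " is a trusted app connecting to Tor (LotX indicator)"
      else assessLoopA process_name process_lower rest

def assess_process_risk (process_name : String) : String :=
  assessLoopA process_name (PySem.Str.lower process_name) high_risk_processes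

-- ===== PORT B =====
def altKeywords : List String :=
  ["chrome", "firefox", "safari", "msedge",
   "python", "python3", "pythonw",
   "node", "nodejs",
   "curl", "wget",
   "powershell", "cmd",
   "outlook", "thunderbird",
   "slack", "teams", "zoom",
   "dropbox", "onedrive", "googledrivefs"]

def assess_process_risk_alt (process_name : String) : String :=
  let low := PySem.Str.lower process_name
  -- any(low.startswith(keywords, i) for i in range(len(low)+1)); low.startswith(k, i) with
  -- 0 ≤ i ≤ len(low) is exactly the prefix test on the i-th suffix of low
  if (List.range (low.toList.length + 1)).any
      (fun i => altKeywords.any (fun k => PySem.Chars.startswith (low.toList.drop i) k.toList)) then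
    "HIGH RISK — " ++ process_name ++ " is a trusted app connecting to Tor (LotX indicator)"
  else
    "UNKNOWN process " ++ process_name ++ " connecting to Tor"

-- ===== PRECONDITION & SPEC =====
def Spec_assess_process_risk (process_name : String) (out : String) : Prop := out = assess_process_risk_alt process_name
instance (process_name : String) (out : String) : Decidable (Spec_assess_process_risk process_name out) := by unfold Spec_assess_process_risk; infer_instance

-- ===== CLAIM (what is proved, stated in full; the proofs are below) =====
def Claim_equal_assess_process_risk : Prop := ∀ (process_name : String), Dom_assess_process_risk process_name → Spec_assess_process_risk process_name (assess_process_risk process_name)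

-- ===== LEMMAS AND PROOFS =====

-- A's early-return loop returns HIGH RISK iff some keyword occurs, UNKNOWN otherwise
lemma assessLoopA_eq (pn low : String) (ks : List String) :
    assessLoopA pn low ks =
      if ks.any (fun k => PySem.Str.isIn k low) then
        "HIGH RISK — " ++ pn ++ " is a trusted app connecting to Tor (LotX indicator)"
      else "UNKNOWN process " ++ pn ++ " connecting to Tor" := by
  induction ks with
  | nil => simp [assessLoopA]
  | cons k rest ih =>
      simp only [assessLoopA, List.any_cons, Bool.or_eq_true]
      by_cases h : PySem.Chars.isIn k.toList low.toList = true <;> simp [h, ih]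

-- the two search conditions agree: a keyword is a substring iff it starts at some position
lemma cond_eq (low : String) (ks : List String) :
    ks.any (fun k => PySem.Str.isIn k low) =
      (List.range (low.toList.length + 1)).any
        (fun i => ks.any (fun k => PySem.Chars.startswith (low.toList.drop i) k.toList)) := by
  rw [Bool.eq_iff_iff]
  simp only [List.any_eq_true, List.mem_range, PySem.Chars.startswith_iff]
  constructor
  · rintro ⟨k, hk, hin⟩
    rw [show PySem.Str.isIn k low = PySem.Chars.isIn k.toList low.toList from
          PySem.Str.isIn_eq k low] at hin
    obtain ⟨j, hj⟩ := (PySem.Chars.exists_prefix_drop_iff_isIn k.toList low.toList).mpr hin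
    refine ⟨min j low.toList.length, by omega, k, hk, ?_⟩
    rcases Nat.lt_or_ge low.toList.length j with h | h
    · have h1 : low.toList.drop j = [] := List.drop_eq_nil_of_le (by omega)
      have h2 : low.toList.drop (min j low.toList.length) = [] :=
        List.drop_eq_nil_of_le (by omega)
      rw [h2]; rw [h1] at hj; exact hj
    · rw [Nat.min_eq_left h]; exact hj
  · rintro ⟨i, _, k, hk, hpre⟩
    refine ⟨k, hk, ?_⟩
    rw [show PySem.Str.isIn k low = PySem.Chars.isIn k.toList low.toList from
          PySem.Str.isIn_eq k low]
    exact (PySem.Chars.exists_prefix_drop_iff_isIn k.toList low.toList).mp ⟨i, hpre⟩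

-- ===== VERDICT (by name: the statement is the Claim_ definition above) =====
theorem assess_process_risk_spec : Claim_equal_assess_process_risk := by
  intro pn _
  unfold Spec_assess_process_risk assess_process_risk assess_process_risk_alt
  rw [assessLoopA_eq]
  rw [show altKeywords = high_risk_processes from rfl]
  rw [cond_eq (PySem.Str.lower pn) high_risk_processes]
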